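-- pv_equiv track=rewrite | github.com/Sassa-nf/pi | rot_lock/a.py | shortestTime
-- ===== SOURCE A (Python) =====
-- def dt(t1, t2, N):
--    return min(t2 + N - t1, t1 - t2) if t2 < t1 else min(t2 - t1, t1 + N - t2)
--
-- def update(cfg, p1, p2, t0):
--    if p1 > p2:
--       p1, p2 = p2, p1
--
--    t1 = cfg.get((p1, p2))
--    if t1 is None or t0 < t1:
--       cfg[(p1, p2)] = t0
--
-- def shortestTime(N, M, xs):
--    if not xs:
--       return 0
--
--    t0 = dt(1, xs[0], N)
--    cfg = {(1, xs[0]): t0}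
--    for d in xs[1:]:
--       nex = {}
--       for (p1, p2), c in cfg.items():
--          update(nex, d, p2, c + dt(p1, d, N))
--          update(nex, d, p1, c + dt(p2, d, N))
--       cfg = nex
--
--    return min(cfg.values())
-- ===== SOURCE B (Python) =====
-- def shortestTime(N, M, xs):
--     # Incremental DP with a running additive offset: the per-step bulk
--     # "+dist(prev,d)" applied to every state is kept in `off`, so the map of
--     # free-hand positions is never rebuilt -- each step does one aggregate
--     # min-scan and one point write (the new entry is always the minimum, so
--     # no compare-and-keep is needed).
--     if not xs:
--         return 0
--
--     def dist(a, b):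
--         return min(b + N - a, a - b) if b < a else min(b - a, a + N - b)
--
--     base = {1: dist(1, xs[0])}   # free-hand position -> cost minus off
--     off = 0
--     prev = xs[0]
--     for d in xs[1:]:
--         c1 = dist(prev, d)
--         cand = min(c + dist(p, d) for p, c in base.items())
--         off += c1
--         base[prev] = cand - c1   # always <= any existing entry for prev
--         prev = d
--     return min(base.values()) + off
-- ===== Notes on version B (the rewrite author's own statement) =====
-- stated objective: faster
-- what changed: B replaces A's per-step rebuild of a pair-keyed dict (two min-updates per state per step) with one persistent map of free-hand positions plus a running additive offset for the bulk '+dist(prev,d)' term: each step is a single aggregate min-scan and one unconditional point write, and the map is never rebuilt.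
import Mathlib
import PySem

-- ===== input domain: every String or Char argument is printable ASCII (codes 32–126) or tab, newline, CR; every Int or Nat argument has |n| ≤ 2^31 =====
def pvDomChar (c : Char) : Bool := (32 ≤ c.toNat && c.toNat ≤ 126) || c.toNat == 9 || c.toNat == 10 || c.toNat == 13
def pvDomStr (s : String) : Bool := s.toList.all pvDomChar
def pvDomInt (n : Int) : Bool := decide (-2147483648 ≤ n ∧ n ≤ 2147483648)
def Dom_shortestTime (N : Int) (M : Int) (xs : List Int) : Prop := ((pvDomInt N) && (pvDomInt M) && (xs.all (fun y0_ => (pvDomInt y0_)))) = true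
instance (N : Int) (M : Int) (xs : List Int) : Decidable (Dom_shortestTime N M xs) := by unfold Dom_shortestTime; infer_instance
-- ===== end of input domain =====

-- B keeps one persistent map of free-hand positions with a running additive offset
-- (one min-scan + one point write per step) instead of rebuilding A's pair-keyed dict
-- of all states each step; a timing run reports the constant-factor speed-up.

-- ===== PORT A =====
def dtA (t1 t2 N : Int) : Int :=
  if t2 < t1 then min (t2 + N - t1) (t1 - t2) else min (t2 - t1) (t1 + N - t2)

def updateA (cfg : PySem.Dict (Int × Int) Int) (p1 p2 t0 : Int) : PySem.Dict (Int × Int) Int :=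
  let pr := if p1 > p2 then (p2, p1) else (p1, p2)
  match cfg.get? pr with
  | none => cfg.insert pr t0
  | some t1 => if t0 < t1 then cfg.insert pr t0 else cfg

def shortestTime (N : Int) (M : Int) (xs : List Int) : Int :=
  match xs with
  | [] => 0
  | x0 :: rest =>
    let t0 := dtA 1 x0 N
    let cfg0 : PySem.Dict (Int × Int) Int := (PySem.Dict.empty).insert (1, x0) t0
    let cfg := rest.foldl (fun cfg d =>
      cfg.items.foldl (fun nex pc =>
        updateA (updateA nex d pc.1.2 (pc.2 + dtA pc.1.1 d N)) d pc.1.1 (pc.2 + dtA pc.1.2 d N))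
        PySem.Dict.empty) cfg0
    match PySem.List.min? cfg.values (fun v => v) with
    | some m => m
    | none => 0   -- unreachable: cfg is never empty when xs ≠ []

-- ===== PORT B =====
def distB (a b N : Int) : Int :=
  if b < a then min (b + N - a) (a - b) else min (b - a) (a + N - b)

-- one loop iteration of Source B: state (prev, off, base)
def stepB (N : Int) (st : Int × Int × PySem.Dict Int Int) (d : Int) : Int × Int × PySem.Dict Int Int :=
  let c1 := distB st.1 d N
  let cand := match PySem.List.min? (st.2.2.items.map (fun q => q.2 + distB q.1 d N)) (fun v => v) with
    | some m => m
    | none => 0   -- unreachable: base is never empty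
  (d, st.2.1 + c1, st.2.2.insert st.1 (cand - c1))

def shortestTime_alt (N : Int) (M : Int) (xs : List Int) : Int :=
  match xs with
  | [] => 0
  | x0 :: rest =>
    let st := rest.foldl (stepB N) (x0, 0, (PySem.Dict.empty).insert 1 (distB 1 x0 N))
    (match PySem.List.min? st.2.2.values (fun v => v) with
     | some m => m
     | none => 0) + st.2.1   -- none unreachable: base is never empty

-- ===== PRECONDITION & SPEC =====
def Spec_shortestTime (N : Int) (M : Int) (xs : List Int) (out : Int) : Prop := out = shortestTime_alt N M xs
instance (N : Int) (M : Int) (xs : List Int) (out : Int) : Decidable (Spec_shortestTime N M xs out) := by unfold Spec_shortestTime; infer_instance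

-- ===== CLAIM (what is proved, stated in full; the proofs are below) =====
def Claim_equal_shortestTime : Prop := ∀ (N : Int) (M : Int) (xs : List Int), Dom_shortestTime N M xs → Spec_shortestTime N M xs (shortestTime N M xs)

-- ===== LEMMAS AND PROOFS =====

-- min-insert: the semantics of A's `update`
def minIns {κ : Type} [BEq κ] (d : PySem.Dict κ Int) (k : κ) (v : Int) : PySem.Dict κ Int :=
  match d.get? k with
  | none => d.insert k v
  | some t => if v < t then d.insert k v else d

def mfold {κ : Type} [BEq κ] (L : List (κ × Int)) (d : PySem.Dict κ Int) : PySem.Dict κ Int :=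
  L.foldl (fun d q => minIns d q.1 q.2) d

def omin (o : Option Int) (v : Int) : Option Int :=
  some (match o with | none => v | some t => min v t)

-- the ordered pair, as A's `update` sorts it
def sp (a b : Int) : Int × Int := if a > b then (b, a) else (a, b)

def normP (q : (Int × Int) × Int) : (Int × Int) × Int := (sp q.1.1 q.1.2, q.2)

-- A's per-state contributions to the next configuration dict
def gA (dd N : Int) (q : (Int × Int) × Int) : List ((Int × Int) × Int) :=
  [(sp dd q.1.2, q.2 + dtA q.1.1 dd N), (sp dd q.1.1, q.2 + dtA q.1.2 dd N)]

-- the same contributions, expressed from B's state (free-hand position, cost-off)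
def gC (prev off dd N : Int) (q : Int × Int) : List ((Int × Int) × Int) :=
  [(sp dd q.1, (q.2 + off) + dtA prev dd N), (sp dd prev, (q.2 + off) + dtA q.1 dd N)]

-- B's base rendered as A-shaped items: pair keys and absolute costs
def mapKV (dd off : Int) (b : PySem.Dict Int Int) : PySem.Dict (Int × Int) Int :=
  ⟨b.items.map (fun q => (sp dd q.1, q.2 + off))⟩

def InvAB (prev off : Int) (cfg : PySem.Dict (Int × Int) Int) (base : PySem.Dict Int Int) : Prop :=
  base.items ≠ [] ∧ base.keys.Nodup ∧ (cfg.items.map normP).Perm (mapKV prev off base).items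

theorem distB_eq_dtA (a b N : Int) : distB a b N = dtA a b N := rfl

theorem sp_comm (a b : Int) : sp a b = sp b a := by
  unfold sp; split_ifs <;> first | rfl | (exfalso; omega) | (simp [Prod.ext_iff]; omega)

theorem sp_idem (a b : Int) : sp (sp a b).1 (sp a b).2 = sp a b := by
  unfold sp; split_ifs <;> simp_all <;> omega

theorem sp_inj (dd : Int) : Function.Injective (sp dd) := by
  intro x y h
  unfold sp at h; split_ifs at h <;> (simp [Prod.ext_iff] at h) <;> omega

theorem updateA_eq (nex : PySem.Dict (Int × Int) Int) (p1 p2 t0 : Int) :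
    updateA nex p1 p2 t0 = minIns nex (sp p1 p2) t0 := rfl

theorem minIns_get?_self {κ : Type} [BEq κ] [LawfulBEq κ] (d : PySem.Dict κ Int) (k : κ) (v : Int) :
    (minIns d k v).get? k = omin (d.get? k) v := by
  unfold minIns omin
  cases h : d.get? k with
  | none => simp [PySem.Dict.get?_insert_self]
  | some t =>
    by_cases hv : v < t
    · simp [hv, PySem.Dict.get?_insert_self, min_eq_left hv.le]
    · simp [hv, h, min_eq_right (not_lt.mp hv)]

theorem minIns_get?_ne {κ : Type} [BEq κ] [LawfulBEq κ] (d : PySem.Dict κ Int) (k k' : κ) (v : Int)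
    (h : k' ≠ k) : (minIns d k v).get? k' = d.get? k' := by
  unfold minIns
  cases d.get? k with
  | none => exact PySem.Dict.get?_insert_of_ne d v h
  | some t =>
    by_cases hv : v < t
    · simp [hv, PySem.Dict.get?_insert_of_ne d v h]
    · simp [hv]

theorem mfold_get? {κ : Type} [BEq κ] [LawfulBEq κ] (L : List (κ × Int)) (d : PySem.Dict κ Int) (k : κ) :
    (mfold L d).get? k = ((L.filter (fun q => q.1 == k)).map (·.2)).foldl omin (d.get? k) := by
  induction L generalizing d with
  | nil => rfl
  | cons q L ih =>
    by_cases h : q.1 = k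
    · subst h
      have hstep : mfold (q :: L) d = mfold L (minIns d q.1 q.2) := rfl
      rw [hstep, ih, minIns_get?_self]
      simp
    · have hb : (q.1 == k) = false := by simp [h]
      have hstep : mfold (q :: L) d = mfold L (minIns d q.1 q.2) := rfl
      rw [hstep, ih, minIns_get?_ne d q.1 k q.2 (fun hk => h hk.symm)]
      simp [hb]

theorem minIns_keys {κ : Type} [BEq κ] [LawfulBEq κ] (d : PySem.Dict κ Int) (k : κ) (v : Int) :
    (minIns d k v).keys = PySem.Set.add d.keys k := by
  unfold minIns PySem.Set.add
  cases h : d.get? k with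
  | none =>
    have hc : d.contains k = false := (PySem.Dict.get?_eq_none_iff_contains d k).mp h
    have hmem : k ∉ d.keys := fun hm => by
      rw [← PySem.Dict.contains_iff_mem_keys] at hm; rw [hm] at hc; cases hc
    have hk : List.contains d.keys k = false := by simpa using hmem
    rw [PySem.Dict.keys_insert_of_not_contains d v hc]
    show _ = if List.contains d.keys k = true then _ else _
    rw [hk]; simp
  | some t =>
    have hc : d.contains k = true := by
      cases hcc : d.contains k
      · rw [(PySem.Dict.get?_eq_none_iff_contains d k).mpr hcc] at h; cases h
      · rfl
    have hk : List.contains d.keys k = true := by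
      have := (PySem.Dict.contains_iff_mem_keys (d := d) (k := k)).mp hc
      simpa using this
    show _ = if List.contains d.keys k = true then _ else _
    rw [hk]
    by_cases hv : v < t
    · simp [hv, PySem.Dict.keys_insert_of_contains d v hc]
    · simp [hv]

theorem set_add_nodup {κ : Type} [BEq κ] [LawfulBEq κ] (s : List κ) (k : κ) (h : s.Nodup) :
    (PySem.Set.add s k).Nodup := by
  show List.Nodup (if List.contains s k = true then s else s ++ [k])
  cases hc : List.contains s k
  · have hm : k ∉ s := by simpa using hc
    simp [List.nodup_append, h]
    intro a ha hak
    exact hm (hak ▸ ha)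
  · simpa using h

theorem mfold_keys_nodup {κ : Type} [BEq κ] [LawfulBEq κ] (L : List (κ × Int)) (d : PySem.Dict κ Int)
    (h : d.keys.Nodup) : (mfold L d).keys.Nodup := by
  induction L generalizing d with
  | nil => exact h
  | cons q L ih =>
    have : (minIns d q.1 q.2).keys.Nodup := by
      rw [minIns_keys]; exact set_add_nodup _ _ h
    exact ih (minIns d q.1 q.2) this

theorem mfold_mem_keys {κ : Type} [BEq κ] [LawfulBEq κ] (L : List (κ × Int)) (d : PySem.Dict κ Int) (k : κ) :
    k ∈ (mfold L d).keys ↔ k ∈ d.keys ∨ k ∈ L.map (·.1) := by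
  induction L generalizing d with
  | nil => simp [mfold]
  | cons q L ih =>
    have step : (mfold (q :: L) d) = mfold L (minIns d q.1 q.2) := rfl
    rw [step, ih, minIns_keys]
    rw [PySem.Set.mem_add]
    simp only [List.map_cons, List.mem_cons]
    tauto

theorem omin_rightComm : RightCommutative omin := by
  constructor
  intro o a b
  cases o <;> (simp [omin]; omega)

theorem mfold_items_perm {κ : Type} [BEq κ] [LawfulBEq κ] {L1 L2 : List (κ × Int)} (h : L1.Perm L2) :
    (mfold L1 PySem.Dict.empty).items.Perm (mfold L2 PySem.Dict.empty).items := by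
  have hn1 := mfold_keys_nodup L1 PySem.Dict.empty PySem.Dict.nodup_keys_empty
  have hn2 := mfold_keys_nodup L2 PySem.Dict.empty PySem.Dict.nodup_keys_empty
  have hkeys : (mfold L1 PySem.Dict.empty).keys.Perm (mfold L2 PySem.Dict.empty).keys := by
    rw [List.perm_ext_iff_of_nodup hn1 hn2]
    intro a
    rw [mfold_mem_keys, mfold_mem_keys]
    have := (h.map (·.1)).mem_iff (a := a)
    tauto
  have hget : ∀ k, (mfold L1 PySem.Dict.empty).get? k = (mfold L2 PySem.Dict.empty).get? k := by
    intro k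
    rw [mfold_get?, mfold_get?]
    exact @List.Perm.foldl_eq _ _ omin _ _ omin_rightComm ((h.filter _).map _) _
  rw [PySem.Dict.items_eq_map_keys _ hn1 0, PySem.Dict.items_eq_map_keys _ hn2 0]
  have hfun : ∀ k, (k, (mfold L1 PySem.Dict.empty).getD k 0) = (k, (mfold L2 PySem.Dict.empty).getD k 0) := by
    intro k
    rw [PySem.Dict.getD_eq_get?_getD, PySem.Dict.getD_eq_get?_getD, hget k]
  rw [List.map_congr_left (l := (mfold L1 PySem.Dict.empty).keys)
    (f := fun k => (k, (mfold L1 PySem.Dict.empty).getD k 0))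
    (g := fun k => (k, (mfold L2 PySem.Dict.empty).getD k 0)) (fun k _ => hfun k)]
  exact hkeys.map _

-- items-perm from nodup keys + same key set + same lookups
theorem dict_items_perm {κ : Type} [BEq κ] [LawfulBEq κ] (d1 d2 : PySem.Dict κ Int)
    (h1 : d1.keys.Nodup) (h2 : d2.keys.Nodup)
    (hk : ∀ k, k ∈ d1.keys ↔ k ∈ d2.keys)
    (hg : ∀ k ∈ d1.keys, d1.get? k = d2.get? k) : d1.items.Perm d2.items := by
  have hkeys : d1.keys.Perm d2.keys := (List.perm_ext_iff_of_nodup h1 h2).mpr hk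
  rw [PySem.Dict.items_eq_map_keys _ h1 0, PySem.Dict.items_eq_map_keys _ h2 0]
  have hfun : ∀ k ∈ d1.keys, (k, d1.getD k 0) = (k, d2.getD k 0) := by
    intro k hkm
    rw [PySem.Dict.getD_eq_get?_getD, PySem.Dict.getD_eq_get?_getD, hg k hkm]
  rw [List.map_congr_left hfun]
  exact hkeys.map _

theorem mapKV_get? (dd off : Int) (b : PySem.Dict Int Int) (y : Int) :
    (mapKV dd off b).get? (sp dd y) = (b.get? y).map (fun v => v + off) := by
  obtain ⟨items⟩ := b
  induction items with
  | nil => rfl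
  | cons q rest ih =>
    show (PySem.Dict.mk ((sp dd q.1, q.2 + off) :: rest.map _)).get? (sp dd y) = _
    rw [PySem.Dict.get?_mk_cons, PySem.Dict.get?_mk_cons]
    have hbe : (sp dd q.1 == sp dd y) = (q.1 == y) := by
      by_cases h : q.1 = y
      · simp [h]
      · have hne : ¬ sp dd q.1 = sp dd y := fun hq => h (sp_inj dd hq)
        simp [h, hne]
    rw [hbe]
    by_cases h : (q.1 == y) = true
    · simp [h]
    · rw [Bool.not_eq_true] at h
      simp only [h, Bool.false_eq_true, if_neg, not_false_iff]
      exact ih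

theorem mapKV_keys (dd off : Int) (b : PySem.Dict Int Int) :
    (mapKV dd off b).keys = b.keys.map (sp dd) := by
  simp [mapKV, PySem.Dict.keys, List.map_map, Function.comp]

-- keys of A's per-step result are ordered pairs, so normP fixes its items
theorem mfold_normP_fix (dd : Int) (L : List ((Int × Int) × Int))
    (hL : ∀ r ∈ L, ∃ z, r.1 = sp dd z) :
    (mfold L PySem.Dict.empty).items.map normP = (mfold L PySem.Dict.empty).items := by
  have hkeys : ∀ q ∈ (mfold L PySem.Dict.empty).items, normP q = q := by
    intro q hq
    have hk : q.1 ∈ (mfold L PySem.Dict.empty).keys := PySem.Dict.mem_keys_of_mem_items _ hq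
    rw [mfold_mem_keys] at hk
    have hk' : q.1 ∈ L.map (·.1) := by
      rcases hk with hk | hk
      · cases hk
      · exact hk
    rw [List.mem_map] at hk'
    obtain ⟨r, hr, hr2⟩ := hk'
    obtain ⟨z, hz⟩ := hL r hr
    have hq1 : q.1 = sp dd z := by rw [← hr2, hz]
    show (sp q.1.1 q.1.2, q.2) = q
    rw [hq1, sp_idem dd z, ← hq1]
  calc (mfold L PySem.Dict.empty).items.map normP
      = (mfold L PySem.Dict.empty).items.map id := List.map_congr_left (fun q hq => hkeys q hq)
    _ = (mfold L PySem.Dict.empty).items := List.map_id _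

def stepA (N dd : Int) (cfg : PySem.Dict (Int × Int) Int) : PySem.Dict (Int × Int) Int :=
  cfg.items.foldl (fun nex pc =>
    updateA (updateA nex dd pc.1.2 (pc.2 + dtA pc.1.1 dd N)) dd pc.1.1 (pc.2 + dtA pc.1.2 dd N))
    PySem.Dict.empty

theorem foldl_two {κ α : Type} [BEq κ] (l : List α) (k1 k2 : α → κ) (v1 v2 : α → Int) (d : PySem.Dict κ Int) :
    l.foldl (fun d q => minIns (minIns d (k1 q) (v1 q)) (k2 q) (v2 q)) d
      = mfold (l.flatMap (fun q => [(k1 q, v1 q), (k2 q, v2 q)])) d := by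
  induction l generalizing d with
  | nil => rfl
  | cons q l ih => simp only [List.foldl_cons, List.flatMap_cons, mfold, List.foldl_append,
      List.foldl_cons, List.foldl_nil] at *; exact ih _

theorem stepA_eq (N dd : Int) (cfg : PySem.Dict (Int × Int) Int) :
    stepA N dd cfg = mfold (cfg.items.flatMap (gA dd N)) PySem.Dict.empty := by
  unfold stepA
  have : ∀ (nex : PySem.Dict (Int × Int) Int) (pc : (Int × Int) × Int), updateA (updateA nex dd pc.1.2 (pc.2 + dtA pc.1.1 dd N)) dd pc.1.1 (pc.2 + dtA pc.1.2 dd N)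
      = minIns (minIns nex (sp dd pc.1.2) (pc.2 + dtA pc.1.1 dd N)) (sp dd pc.1.1) (pc.2 + dtA pc.1.2 dd N) := by
    intro nex pc; rw [updateA_eq, updateA_eq]
  simp only [this]
  exact foldl_two cfg.items _ _ _ _ _

theorem gA_norm (dd N : Int) (q : (Int × Int) × Int) : (gA dd N q).Perm (gA dd N (normP q)) := by
  unfold gA normP sp
  by_cases h : q.1.1 > q.1.2
  · simp only [h, if_pos]
    exact List.Perm.swap _ _ _
  · simp [h]

theorem gA_gC (prev off dd N : Int) (q : Int × Int) :
    (gA dd N (sp prev q.1, (q.2 + off))).Perm (gC prev off dd N q) := by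
  unfold gA gC
  by_cases h : prev > q.1
  · have : sp prev q.1 = (q.1, prev) := by unfold sp; simp [h]
    rw [this]
    exact List.Perm.swap _ _ _
  · have : sp prev q.1 = (prev, q.1) := by unfold sp; simp [h]
    rw [this]

-- filter of the contribution list at a key other than the new free hand
theorem filter_gC_ne (prev off dd N y : Int) (l : List (Int × Int)) (hy : y ≠ prev) :
    ((l.flatMap (gC prev off dd N)).filter (fun r => r.1 == sp dd y)).map (·.2)
      = (l.filter (fun q => q.1 == y)).map (fun q => q.2 + off + dtA prev dd N) := by
  induction l with
  | nil => rfl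
  | cons q l ih =>
    have h2 : (sp dd prev == sp dd y) = false := by
      have : ¬ sp dd prev = sp dd y := fun hq => hy (sp_inj dd hq).symm
      simpa using this
    by_cases h : q.1 = y
    · have h1 : (sp dd q.1 == sp dd y) = true := by simp [h]
      simp only [List.flatMap_cons, List.filter_append, List.map_append, List.filter_cons,
        gC, h1, h2, List.filter_nil, ih]
      simp [h]
    · have h1 : (sp dd q.1 == sp dd y) = false := by
        have : ¬ sp dd q.1 = sp dd y := fun hq => h (sp_inj dd hq)
        simpa using this
      simp only [List.flatMap_cons, List.filter_append, List.map_append, List.filter_cons,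
        gC, h1, h2, List.filter_nil, ih]
      have h3 : (q.1 == y) = false := by simpa using h
      simp [h3]

-- filter at the new free-hand key: every surviving value is an old cost + its move
theorem filter_gC_prev (prev off dd N : Int) (l : List (Int × Int)) :
    ((l.flatMap (gC prev off dd N)).filter (fun r => r.1 == sp dd prev)).map (·.2)
      = l.flatMap (fun q => if q.1 = prev then [q.2 + off + dtA q.1 dd N, q.2 + off + dtA q.1 dd N]
                            else [q.2 + off + dtA q.1 dd N]) := by
  induction l with
  | nil => rfl
  | cons q l ih =>
    have h2 : (sp dd prev == sp dd prev) = true := by simp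
    by_cases h : q.1 = prev
    · have h1 : (sp dd q.1 == sp dd prev) = true := by simp [h]
      simp only [List.flatMap_cons, List.filter_append, List.map_append, List.filter_cons,
        gC, h1, h2, List.filter_nil, ih, if_pos h]
      simp [h]
    · have h1 : (sp dd q.1 == sp dd prev) = false := by
        have : ¬ sp dd q.1 = sp dd prev := fun hq => h (sp_inj dd hq)
        simpa using this
      simp only [List.flatMap_cons, List.filter_append, List.map_append, List.filter_cons,
        gC, h1, h2, List.filter_nil, ih, if_neg h]
      simp

theorem foldl_omin_some (l : List Int) (acc : Int) :
    l.foldl omin (some acc) = some (l.foldl min acc) := by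
  induction l generalizing acc with
  | nil => rfl
  | cons a l ih =>
    show l.foldl omin (omin (some acc) a) = _
    have : omin (some acc) a = some (min acc a) := by simp [omin, min_comm]
    rw [this, ih]
    rfl

theorem foldl_omin_eq_some (l : List Int) (m : Int) (hm : m ∈ l) (hle : ∀ x ∈ l, m ≤ x) :
    l.foldl omin none = some m := by
  cases l with
  | nil => cases hm
  | cons a t =>
    show t.foldl omin (omin none a) = some m
    have : omin none a = some a := rfl
    rw [this, foldl_omin_some]
    congr 1
    have hfl := PySem.List.foldl_min_le t a
    have hmem := PySem.List.foldl_min_mem t a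
    have h1 : m ≤ t.foldl min a := by
      rcases hmem with h | h
      · rw [h]; exact hle a (by simp)
      · exact hle _ (by simp [h])
    have h2 : t.foldl min a ≤ m := by
      rcases List.mem_cons.mp hm with h | h
      · rw [h]; exact hfl.1
      · exact hfl.2 m h
    omega

theorem min?_map_add (l : List Int) (off : Int) :
    PySem.List.min? (l.map (fun v => v + off)) (fun v => v)
      = (PySem.List.min? l (fun v => v)).map (fun v => v + off) := by
  cases l with
  | nil => rfl
  | cons a t =>
    rw [List.map_cons, PySem.List.min?_id_cons, PySem.List.min?_id_cons]
    have : ∀ (acc : Int), (t.map (fun v => v + off)).foldl min (acc + off) = t.foldl min acc + off := by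
      intro acc
      induction t generalizing acc with
      | nil => rfl
      | cons b t ih =>
        simp only [List.map_cons, List.foldl_cons]
        have hmm : min (acc + off) (b + off) = min acc b + off := by omega
        rw [hmm, ih]
    rw [this a]
    rfl

-- one key of a nodup-key dict filters to its single item
theorem filter_items_single (b : PySem.Dict Int Int) (h : b.keys.Nodup) (y c : Int)
    (hg : b.get? y = some c) : b.items.filter (fun q => q.1 == y) = [(y, c)] := by
  obtain ⟨items⟩ := b
  induction items with
  | nil => cases hg
  | cons q rest ih =>
    rw [PySem.Dict.get?_mk_cons] at hg
    have hnd : ((PySem.Dict.mk rest : PySem.Dict Int Int).keys).Nodup ∧ q.1 ∉ rest.map (·.1) := by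
      have := h
      simp only [PySem.Dict.keys] at this ⊢
      simp only [List.map_cons, List.nodup_cons] at this
      exact ⟨this.2, this.1⟩
    by_cases hk : (q.1 == y) = true
    · rw [if_pos hk] at hg
      have hqy : q.1 = y := by simpa using hk
      have hrest : rest.filter (fun r => r.1 == y) = [] := by
        rw [List.filter_eq_nil_iff]
        intro r hr hb
        have : r.1 = y := by simpa using hb
        exact hnd.2 (by rw [hqy, ← this]; exact List.mem_map_of_mem hr)
      show List.filter _ (q :: rest) = _
      rw [List.filter_cons, if_pos hk, hrest]
      have : q = (y, c) := by
        obtain ⟨q1, q2⟩ := q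
        simp only at hqy
        cases hg
        rw [hqy]
      rw [this]
    · rw [if_neg (by simpa using hk)] at hg
      show List.filter _ (q :: rest) = _
      rw [List.filter_cons, if_neg (by simp at hk ⊢; exact hk)]
      exact ih hnd.1 hg

theorem mem_keys_some (b : PySem.Dict Int Int) (y : Int) (h : y ∈ b.keys) :
    ∃ c, b.get? y = some c := by
  cases hc : b.get? y with
  | none => exact absurd h ((PySem.Dict.get?_eq_none_iff_not_mem_keys _ _).mp hc)
  | some c => exact ⟨c, rfl⟩

theorem items_insert_ne_nil (b : PySem.Dict Int Int) (k v : Int) (h : b.items ≠ []) :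
    (b.insert k v).items ≠ [] := by
  rw [PySem.Dict.items_insert]
  by_cases hc : b.contains k = true
  · simp [hc]
    intro hmap
    exact h hmap
  · simp only [Bool.not_eq_true] at hc
    simp [hc]

-- one step preserves the A↔B correspondence
theorem step_inv (N dd prev off : Int) (cfg : PySem.Dict (Int × Int) Int) (base : PySem.Dict Int Int)
    (h : InvAB prev off cfg base) :
    InvAB dd (off + distB prev dd N) (stepA N dd cfg) ((stepB N (prev, off, base) dd).2.2) := by
  obtain ⟨hne, hnd, hperm⟩ := h
  obtain ⟨cand, hcand⟩ : ∃ m, PySem.List.min? (base.items.map (fun q => q.2 + distB q.1 dd N)) (fun v => v) = some m := by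
    cases hm : PySem.List.min? (base.items.map (fun q => q.2 + distB q.1 dd N)) (fun v => v) with
    | none =>
      exfalso
      exact hne (List.map_eq_nil_iff.mp ((PySem.List.min?_eq_none_iff _ _).mp hm))
    | some m => exact ⟨m, rfl⟩
  have hstepB : (stepB N (prev, off, base) dd).2.2
      = base.insert prev (cand - distB prev dd N) := by
    show base.insert prev ((match PySem.List.min? (base.items.map (fun q => q.2 + distB q.1 dd N)) (fun v => v) with
      | some m => m | none => 0) - distB prev dd N) = _
    rw [hcand]
  rw [hstepB]
  have hnbnd : (base.insert prev (cand - distB prev dd N)).keys.Nodup :=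
    PySem.Dict.nodup_keys_insert base prev (cand - distB prev dd N) hnd
  refine ⟨items_insert_ne_nil base prev (cand - distB prev dd N) hne, hnbnd, ?_⟩
  have hLperm : (cfg.items.flatMap (gA dd N)).Perm (base.items.flatMap (gC prev off dd N)) := by
    have p1 : (cfg.items.flatMap (gA dd N)).Perm (cfg.items.flatMap (fun q => gA dd N (normP q))) :=
      List.Perm.flatMap_left _ (fun q _ => gA_norm dd N q)
    have p2 : ((cfg.items.map normP).flatMap (gA dd N)).Perm
        ((mapKV prev off base).items.flatMap (gA dd N)) :=
      List.Perm.flatMap_right _ hperm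
    have p3 : (base.items.flatMap (fun q => gA dd N (sp prev q.1, q.2 + off))).Perm
        (base.items.flatMap (gC prev off dd N)) :=
      List.Perm.flatMap_left _ (fun q _ => gA_gC prev off dd N q)
    rw [List.flatMap_map] at p2
    have hmkv : (mapKV prev off base).items.flatMap (gA dd N)
        = base.items.flatMap (fun q => gA dd N (sp prev q.1, q.2 + off)) := by
      show (base.items.map _).flatMap (gA dd N) = _
      rw [List.flatMap_map]
    rw [hmkv] at p2
    exact (p1.trans p2).trans p3
  have hA : (stepA N dd cfg).items.Perm
      (mfold (base.items.flatMap (gC prev off dd N)) PySem.Dict.empty).items := by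
    rw [stepA_eq]
    exact mfold_items_perm hLperm
  have hLsp : ∀ r ∈ base.items.flatMap (gC prev off dd N), ∃ z, r.1 = sp dd z := by
    intro r hr
    rw [List.mem_flatMap] at hr
    obtain ⟨q, -, hq⟩ := hr
    unfold gC at hq
    simp only [List.mem_cons, List.not_mem_nil, or_false] at hq
    rcases hq with hq | hq
    · exact ⟨q.1, by rw [hq]⟩
    · exact ⟨prev, by rw [hq]⟩
  have hk : ∀ k, k ∈ (mfold (base.items.flatMap (gC prev off dd N)) PySem.Dict.empty).keys
      ↔ k ∈ (mapKV dd (off + distB prev dd N) (base.insert prev (cand - distB prev dd N))).keys := by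
    intro k
    rw [mfold_mem_keys, mapKV_keys]
    have hLk : k ∈ (base.items.flatMap (gC prev off dd N)).map (·.1)
        ↔ (∃ q ∈ base.items, k = sp dd q.1) ∨ k = sp dd prev := by
      constructor
      · intro hk
        rw [List.mem_map] at hk
        obtain ⟨r, hr, hr2⟩ := hk
        rw [List.mem_flatMap] at hr
        obtain ⟨q, hq, hqr⟩ := hr
        unfold gC at hqr
        simp only [List.mem_cons, List.not_mem_nil, or_false] at hqr
        rcases hqr with hqr | hqr
        · exact Or.inl ⟨q, hq, by rw [← hr2, hqr]⟩
        · exact Or.inr (by rw [← hr2, hqr])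
      · intro hk
        rw [List.mem_map]
        rcases hk with ⟨q, hq, hqk⟩ | hk
        · exact ⟨(sp dd q.1, (q.2 + off) + dtA prev dd N),
            List.mem_flatMap.mpr ⟨q, hq, by simp [gC]⟩, hqk.symm⟩
        · obtain ⟨q, hq⟩ := List.exists_mem_of_ne_nil _ hne
          exact ⟨(sp dd prev, (q.2 + off) + dtA q.1 dd N),
            List.mem_flatMap.mpr ⟨q, hq, by simp [gC]⟩, hk.symm⟩
    simp only [PySem.Dict.keys_empty, List.not_mem_nil, false_or]
    rw [hLk]
    constructor
    · intro hk
      rw [List.mem_map]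
      rcases hk with ⟨q, hq, hqk⟩ | hk
      · exact ⟨q.1, (PySem.Dict.mem_keys_insert _ _ _ _).mpr (Or.inr (List.mem_map_of_mem hq)), hqk.symm⟩
      · exact ⟨prev, (PySem.Dict.mem_keys_insert _ _ _ _).mpr (Or.inl rfl), hk.symm⟩
    · intro hk
      rw [List.mem_map] at hk
      obtain ⟨y, hy, hyk⟩ := hk
      rcases (PySem.Dict.mem_keys_insert _ _ _ _).mp hy with hy' | hy'
      · exact Or.inr (by rw [← hyk, hy'])
      · refine Or.inl ?_
        simp only [PySem.Dict.keys, List.mem_map] at hy'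
        obtain ⟨q, hq, hq1⟩ := hy'
        exact ⟨q, hq, by rw [← hyk, hq1]⟩
  have hg : ∀ k ∈ (mfold (base.items.flatMap (gC prev off dd N)) PySem.Dict.empty).keys,
      (mfold (base.items.flatMap (gC prev off dd N)) PySem.Dict.empty).get? k
        = (mapKV dd (off + distB prev dd N) (base.insert prev (cand - distB prev dd N))).get? k := by
    intro k hkmem
    rw [mfold_mem_keys] at hkmem
    simp only [PySem.Dict.keys_empty, List.not_mem_nil, false_or] at hkmem
    obtain ⟨y, hy⟩ : ∃ y, k = sp dd y := by
      rw [List.mem_map] at hkmem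
      obtain ⟨r, hr, hr2⟩ := hkmem
      obtain ⟨z, hz⟩ := hLsp r hr
      exact ⟨z, by rw [← hr2, hz]⟩
    subst hy
    rw [mfold_get?, mapKV_get?, PySem.Dict.get?_empty]
    by_cases hyp : y = prev
    · rw [hyp]
      rw [filter_gC_prev]
      rw [PySem.Dict.get?_insert_self]
      have hmemc := PySem.List.min?_mem hcand
      rw [List.mem_map] at hmemc
      obtain ⟨q0, hq0, hq0v⟩ := hmemc
      have hle := PySem.List.min?_isMin hcand
      have hfold : (base.items.flatMap (fun q =>
          if q.1 = prev then [q.2 + off + dtA q.1 dd N, q.2 + off + dtA q.1 dd N]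
          else [q.2 + off + dtA q.1 dd N])).foldl omin none = some (cand + off) := by
        apply foldl_omin_eq_some
        · rw [List.mem_flatMap]
          refine ⟨q0, hq0, ?_⟩
          have hv : q0.2 + off + dtA q0.1 dd N = cand + off := by
            rw [← hq0v, distB_eq_dtA]; ring
          split_ifs <;> simp [hv]
        · intro x hx
          rw [List.mem_flatMap] at hx
          obtain ⟨q, hq, hxq⟩ := hx
          have hxval : x = q.2 + off + dtA q.1 dd N := by
            split_ifs at hxq <;> simpa using hxq
          have hcle : cand ≤ q.2 + distB q.1 dd N := by
            apply hle
            rw [List.mem_map]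
            exact ⟨q, hq, rfl⟩
          rw [distB_eq_dtA] at hcle
          omega
      rw [hfold]
      simp only [Option.map_some]
      congr 1
      rw [distB_eq_dtA]
      ring
    · have hymem : y ∈ base.keys := by
        rw [List.mem_map] at hkmem
        obtain ⟨r, hr, hr2⟩ := hkmem
        rw [List.mem_flatMap] at hr
        obtain ⟨q, hq, hqr⟩ := hr
        unfold gC at hqr
        simp only [List.mem_cons, List.not_mem_nil, or_false] at hqr
        rcases hqr with hqr | hqr
        · have hq1 : q.1 = y := by
            apply sp_inj dd
            rw [← hr2, hqr]
          rw [← hq1]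
          exact List.mem_map_of_mem hq
        · exfalso
          apply hyp
          apply sp_inj dd
          rw [← hr2, hqr]
      obtain ⟨c, hc⟩ := mem_keys_some base y hymem
      rw [filter_gC_ne _ _ _ _ _ _ hyp, filter_items_single base hnd y c hc]
      rw [PySem.Dict.get?_insert_of_ne base (cand - distB prev dd N) hyp, hc]
      simp only [List.map_cons, List.map_nil, List.foldl_cons, List.foldl_nil, Option.map_some]
      simp only [omin, distB_eq_dtA]
      congr 1
      ring
  have hD := dict_items_perm _ _ (mfold_keys_nodup _ _ PySem.Dict.nodup_keys_empty)
    (by rw [mapKV_keys]; exact hnbnd.map (sp_inj dd)) hk hg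
  have hmapped := hA.map normP
  rw [mfold_normP_fix dd _ hLsp] at hmapped
  exact hmapped.trans hD

theorem loop_inv (N : Int) (rest : List Int) (prev off : Int) (cfg : PySem.Dict (Int × Int) Int)
    (base : PySem.Dict Int Int) (h : InvAB prev off cfg base) :
    InvAB (rest.foldl (stepB N) (prev, off, base)).1 (rest.foldl (stepB N) (prev, off, base)).2.1
      (rest.foldl (fun cfg d => stepA N d cfg) cfg)
      (rest.foldl (stepB N) (prev, off, base)).2.2 := by
  induction rest generalizing prev off cfg base with
  | nil => exact h
  | cons d rest ih =>
    simp only [List.foldl_cons]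
    have hstep := step_inv N d prev off cfg base h
    have : stepB N (prev, off, base) d = (d, off + distB prev d N, (stepB N (prev, off, base) d).2.2) := rfl
    rw [this]
    exact ih d (off + distB prev d N) (stepA N d cfg) _ hstep

theorem min?_perm_id {l1 l2 : List Int} (h : l1.Perm l2) :
    PySem.List.min? l1 (fun v => v) = PySem.List.min? l2 (fun v => v) := by
  cases h1 : PySem.List.min? l1 (fun v => v) with
  | none =>
    rw [PySem.List.min?_eq_none_iff] at h1
    subst h1
    have : l2 = [] := h.symm.eq_nil
    rw [this]
    rfl
  | some m =>
    cases h2 : PySem.List.min? l2 (fun v => v) with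
    | none =>
      rw [PySem.List.min?_eq_none_iff] at h2
      subst h2
      rw [h.eq_nil] at h1
      cases h1
    | some m' =>
      have hm : m ∈ l1 := PySem.List.min?_mem h1
      have hm' : m' ∈ l2 := PySem.List.min?_mem h2
      have le1 : m ≤ m' := PySem.List.min?_isMin h1 m' (h.mem_iff.mpr hm')
      have le2 : m' ≤ m := PySem.List.min?_isMin h2 m (h.mem_iff.mp hm)
      rw [le_antisymm le1 le2]

-- ===== VERDICT (by name: the statement is the Claim_ definition above) =====
theorem shortestTime_spec : Claim_equal_shortestTime := by
  unfold Claim_equal_shortestTime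
  intro N M xs _
  unfold Spec_shortestTime
  cases xs with
  | nil => rfl
  | cons x0 rest =>
    show (match PySem.List.min? (rest.foldl (fun cfg d => stepA N d cfg)
            ((PySem.Dict.empty).insert (1, x0) (dtA 1 x0 N))).values (fun v => v) with
          | some m => m | none => 0)
        = (match PySem.List.min? (rest.foldl (stepB N)
            (x0, 0, (PySem.Dict.empty).insert 1 (distB 1 x0 N))).2.2.values (fun v => v) with
          | some m => m | none => 0) + (rest.foldl (stepB N)
            (x0, 0, (PySem.Dict.empty).insert 1 (distB 1 x0 N))).2.1
    have hinit : InvAB x0 0 ((PySem.Dict.empty).insert (1, x0) (dtA 1 x0 N))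
        ((PySem.Dict.empty).insert 1 (distB 1 x0 N)) := by
      refine ⟨by simp [PySem.Dict.insert, PySem.Dict.empty], by simp [PySem.Dict.insert, PySem.Dict.empty], ?_⟩
      show (List.map normP [((1, x0), dtA 1 x0 N)]).Perm
        (List.map (fun q => (sp x0 q.1, q.2 + 0)) [(1, distB 1 x0 N)])
      simp only [List.map_cons, List.map_nil, normP, add_zero, distB_eq_dtA, sp_comm x0 1]
      exact List.Perm.refl _
    have hinv := loop_inv N rest x0 0 _ _ hinit
    obtain ⟨hne, hnd, hperm⟩ := hinv
    have hv := hperm.map (·.2)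
    have hvl : ((rest.foldl (fun cfg d => stepA N d cfg)
        ((PySem.Dict.empty).insert (1, x0) (dtA 1 x0 N))).items.map normP).map (·.2)
        = (rest.foldl (fun cfg d => stepA N d cfg)
        ((PySem.Dict.empty).insert (1, x0) (dtA 1 x0 N))).values := by
      rw [List.map_map]
      rfl
    have hvr : ((mapKV (rest.foldl (stepB N) (x0, 0, (PySem.Dict.empty).insert 1 (distB 1 x0 N))).1
          (rest.foldl (stepB N) (x0, 0, (PySem.Dict.empty).insert 1 (distB 1 x0 N))).2.1
          (rest.foldl (stepB N) (x0, 0, (PySem.Dict.empty).insert 1 (distB 1 x0 N))).2.2).items).map (·.2)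
        = (rest.foldl (stepB N) (x0, 0, (PySem.Dict.empty).insert 1 (distB 1 x0 N))).2.2.values.map
            (fun v => v + (rest.foldl (stepB N) (x0, 0, (PySem.Dict.empty).insert 1 (distB 1 x0 N))).2.1) := by
      show ((_ : PySem.Dict Int Int).items.map _).map _ = _
      rw [List.map_map]
      show _ = ((_ : PySem.Dict Int Int).items.map (·.2)).map _
      rw [List.map_map]
      rfl
    rw [hvl, hvr] at hv
    have hmin := min?_perm_id hv
    rw [min?_map_add] at hmin
    obtain ⟨m, hm⟩ : ∃ m, PySem.List.min? (rest.foldl (stepB N)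
        (x0, 0, (PySem.Dict.empty).insert 1 (distB 1 x0 N))).2.2.values (fun v => v) = some m := by
      cases hmm : PySem.List.min? (rest.foldl (stepB N)
          (x0, 0, (PySem.Dict.empty).insert 1 (distB 1 x0 N))).2.2.values (fun v => v) with
      | none =>
        exfalso
        apply hne
        have := (PySem.List.min?_eq_none_iff _ _).mp hmm
        exact List.map_eq_nil_iff.mp this
      | some m => exact ⟨m, rfl⟩
    rw [hm] at hmin
    rw [hmin, hm]
    rfl
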